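-- pv_equiv track=rewrite | github.com/kazamazza/pokerai | utils/equity.py | expand_combo_string
-- ===== SOURCE A (Python) =====
-- def expand_combo_string(combo: str) -> list[str]:
--     """
--     Expands shorthand combos into all valid concrete hand combinations.
--
--     Examples:
--         'AKs' -> ['AsKs', 'AhKh', 'AdKd', 'AcKc']
--         'AKo' -> ['AsKd', 'AsKh', ..., 'AcKh']
--         'AK'  -> all 16 combos (suited + offsuit)
--         '22'  -> all 6 pairs: ['2s2h', '2s2d', '2s2c', ...]
--     """
--     suits = 'shdc'
--     cards = []
--
--     # Extract rank(s) and suitedness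
--     if len(combo) == 3:
--         r1, r2, suitedness = combo[0], combo[1], combo[2]
--     elif len(combo) == 2:
--         r1, r2 = combo[0], combo[1]
--         suitedness = None
--     else:
--         return []  # invalid combo string
--
--     for s1 in suits:
--         for s2 in suits:
--             if r1 == r2:
--                 if s1 >= s2:
--                     continue  # avoid duplicates in pairs
--             elif s1 == s2 and suitedness == 'o':
--                 continue  # skip suited when offsuit requested
--             elif s1 != s2 and suitedness == 's':
--                 continue  # skip offsuit when suited requested
--
--             c1, c2 = r1 + s1, r2 + s2
--             if c1 == c2:
--                 continue  # skip identical cards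
--             cards.append(c1 + c2)
--
--     return cards
-- ===== SOURCE B (Python) =====
-- # Table-driven: the suit-pair sequence for each case is a precomputed constant;
-- # the function just selects a table and stitches the ranks into each row.
-- _PAIR = [('h', 's'), ('d', 's'), ('d', 'h'), ('c', 's'), ('c', 'h'), ('c', 'd')]
-- _SUITED = [('s', 's'), ('h', 'h'), ('d', 'd'), ('c', 'c')]
-- _OFFSUIT = [('s', 'h'), ('s', 'd'), ('s', 'c'),
--             ('h', 's'), ('h', 'd'), ('h', 'c'),
--             ('d', 's'), ('d', 'h'), ('d', 'c'),
--             ('c', 's'), ('c', 'h'), ('c', 'd')]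
-- _ALL = [('s', 's'), ('s', 'h'), ('s', 'd'), ('s', 'c'),
--         ('h', 's'), ('h', 'h'), ('h', 'd'), ('h', 'c'),
--         ('d', 's'), ('d', 'h'), ('d', 'd'), ('d', 'c'),
--         ('c', 's'), ('c', 'h'), ('c', 'd'), ('c', 'c')]
-- _BY_SUITEDNESS = {'s': _SUITED, 'o': _OFFSUIT}
--
--
-- def expand_combo_string(combo: str) -> list[str]:
--     if len(combo) == 3:
--         r1, r2, sd = combo[0], combo[1], combo[2]
--     elif len(combo) == 2:
--         r1, r2 = combo[0], combo[1]
--         sd = None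
--     else:
--         return []
--     table = _PAIR if r1 == r2 else _BY_SUITEDNESS.get(sd, _ALL)
--     return [r1 + a + r2 + b for a, b in table]
-- ===== Notes on version B (the rewrite author's own statement) =====
-- stated objective: simpler
-- what changed: Replaces A's 4x4 nested suit loop with its three-way in-loop branch ladder by four precomputed literal suit-pair tables (pair/suited/offsuit/all) selected by one dict lookup, the function reduced to a single map stitching the ranks into the chosen table.
import Mathlib
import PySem

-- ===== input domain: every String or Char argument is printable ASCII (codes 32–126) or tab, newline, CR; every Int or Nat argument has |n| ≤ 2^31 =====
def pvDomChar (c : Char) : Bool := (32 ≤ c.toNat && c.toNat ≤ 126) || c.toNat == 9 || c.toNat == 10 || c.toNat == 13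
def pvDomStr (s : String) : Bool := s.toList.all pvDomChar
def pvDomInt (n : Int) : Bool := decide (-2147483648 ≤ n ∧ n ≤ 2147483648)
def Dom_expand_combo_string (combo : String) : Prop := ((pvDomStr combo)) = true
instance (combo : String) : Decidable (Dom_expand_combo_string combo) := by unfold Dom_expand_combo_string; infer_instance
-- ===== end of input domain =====

-- B replaces A's filtered 4×4 suit loop by precomputed literal suit-pair tables selected
-- by one lookup, with a single map stitching the ranks in (objective: simpler).

-- ===== PORT A =====
-- A's double loop over suits with the branch ladder, appending kept combos in order.
def pvAInner (r1 r2 : Char) (suitedness : Option Char) : List String :=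
  let suits := "shdc".toList
  suits.foldl (fun acc s1 =>
    suits.foldl (fun acc s2 =>
      if r1 = r2 then
        if s2 ≤ s1 then acc  -- s1 >= s2: continue
        else
          let c1 := String.ofList [r1, s1]
          let c2 := String.ofList [r2, s2]
          if c1 = c2 then acc else acc ++ [c1 ++ c2]
      else if s1 = s2 ∧ suitedness = some 'o' then acc
      else if s1 ≠ s2 ∧ suitedness = some 's' then acc
      else
        let c1 := String.ofList [r1, s1]
        let c2 := String.ofList [r2, s2]
        if c1 = c2 then acc else acc ++ [c1 ++ c2]) acc) []

def expand_combo_string (combo : String) : List String :=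
  match combo.toList with
  | [r1, r2, suitedness] => pvAInner r1 r2 (some suitedness)
  | [r1, r2] => pvAInner r1 r2 none
  | _ => []

-- ===== PORT B =====
-- B's literal suit-pair tables (module constants in Source B).
def pvPairTable : List (Char × Char) :=
  [('h', 's'), ('d', 's'), ('d', 'h'), ('c', 's'), ('c', 'h'), ('c', 'd')]
def pvSuitedTable : List (Char × Char) :=
  [('s', 's'), ('h', 'h'), ('d', 'd'), ('c', 'c')]
def pvOffsuitTable : List (Char × Char) :=
  [('s', 'h'), ('s', 'd'), ('s', 'c'),
   ('h', 's'), ('h', 'd'), ('h', 'c'),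
   ('d', 's'), ('d', 'h'), ('d', 'c'),
   ('c', 's'), ('c', 'h'), ('c', 'd')]
def pvAllTable : List (Char × Char) :=
  [('s', 's'), ('s', 'h'), ('s', 'd'), ('s', 'c'),
   ('h', 's'), ('h', 'h'), ('h', 'd'), ('h', 'c'),
   ('d', 's'), ('d', 'h'), ('d', 'd'), ('d', 'c'),
   ('c', 's'), ('c', 'h'), ('c', 'd'), ('c', 'c')]
-- _BY_SUITEDNESS dict keyed by the suitedness char (None for 2-char combos).
def pvBySuitedness : PySem.Dict (Option Char) (List (Char × Char)) :=
  PySem.Dict.mk [(some 's', pvSuitedTable), (some 'o', pvOffsuitTable)]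

def pvStitch (r1 r2 : Char) (sd : Option Char) : List String :=
  let table := if r1 = r2 then pvPairTable else PySem.Dict.getD pvBySuitedness sd pvAllTable
  table.map (fun ab => String.ofList [r1, ab.1, r2, ab.2])

def expand_combo_string_alt (combo : String) : List String :=
  let l := combo.toList
  if l.length = 3 then pvStitch (l.getD 0 ' ') (l.getD 1 ' ') (some (l.getD 2 ' '))
  else if l.length = 2 then pvStitch (l.getD 0 ' ') (l.getD 1 ' ') none
  else []

-- ===== PRECONDITION & SPEC =====
def Spec_expand_combo_string (combo : String) (out : List String) : Prop := out = expand_combo_string_alt combo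
instance (combo : String) (out : List String) : Decidable (Spec_expand_combo_string combo out) := by unfold Spec_expand_combo_string; infer_instance

-- ===== CLAIM (what is proved, stated in full; the proofs are below) =====
def Claim_equal_expand_combo_string : Prop := ∀ (combo : String), Dom_expand_combo_string combo → Spec_expand_combo_string combo (expand_combo_string combo)

-- ===== LEMMAS AND PROOFS =====

theorem pvCore_eq (r1 r2 : Char) (sd : Option Char) :
    pvAInner r1 r2 sd =
      (if r1 = r2 then pvPairTable else PySem.Dict.getD pvBySuitedness sd pvAllTable).map
        (fun ab => String.ofList [r1, ab.1, r2, ab.2]) := by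
  by_cases h : r1 = r2
  · subst h
    simp [pvAInner, pvPairTable, Char.le_def, String.ext_iff]
  · by_cases hs : sd = some 's'
    · subst hs
      simp [pvAInner, pvBySuitedness, PySem.Dict.getD,
        PySem.Dict.get?_mk_cons, pvSuitedTable, h, String.ext_iff]
    · by_cases ho : sd = some 'o'
      · subst ho
        simp [pvAInner, pvBySuitedness, PySem.Dict.getD,
          PySem.Dict.get?_mk_cons, pvOffsuitTable, h, String.ext_iff]
      · have hget : PySem.Dict.getD pvBySuitedness sd pvAllTable = pvAllTable := by
          have hs' : some 's' ≠ sd := fun e => hs e.symm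
          have ho' : some 'o' ≠ sd := fun e => ho e.symm
          simp [pvBySuitedness, PySem.Dict.getD, PySem.Dict.get?, hs', ho']
        rw [hget]
        simp [pvAInner, pvAllTable, h, hs, ho, String.ext_iff]

-- ===== VERDICT (by name: the statement is the Claim_ definition above) =====
theorem expand_combo_string_spec : Claim_equal_expand_combo_string := by
  intro combo _
  unfold Spec_expand_combo_string expand_combo_string expand_combo_string_alt
  cases hl : combo.toList with
  | nil => rfl
  | cons a t =>
    cases t with
    | nil => rfl
    | cons b t2 =>
      cases t2 with
      | nil => simpa [pvStitch] using pvCore_eq a b none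
      | cons c t3 =>
        cases t3 with
        | nil => simpa [pvStitch] using pvCore_eq a b (some c)
        | cons d t4 => simp
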